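-- pv_equiv track=rewrite | github.com/QwQ-maker/4box | sbox_analysis.py | anf_to_string
-- ===== SOURCE A (Python) =====
-- def anf_to_string(anf_coeffs, n, var_names=None):
--     """
--     将ANF系数转换为可读的代数表达式字符串
--     """
--     if var_names is None:
--         var_names = [f"x{i}" for i in range(n)]
--
--     terms = []
--     size = 1 << n
--     for k in range(size):
--         if anf_coeffs[k] == 1:
--             if k == 0:
--                 terms.append("1")
--             else:
--                 factors = []
--                 for i in range(n):
--                     if (k >> i) & 1:
--                         factors.append(var_names[i])
--                 terms.append("".join(factors))
--
--     if not terms: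
--         return "0"
--     return " ⊕ ".join(terms)
-- ===== SOURCE B (Python) =====
-- def anf_to_string(anf_coeffs, n, var_names=None):
--     """
--     将ANF系数转换为可读的代数表达式字符串
--     """
--     if var_names is None:
--         var_names = [f"x{i}" for i in range(n)]
--
--     size = 1 << n
--     # Dynamic programming over monomial masks: the monomial string for mask k
--     # is the monomial for k with its highest bit removed, extended by that
--     # variable.  No per-term scan over all n bit positions.
--     table = [""]
--     for k in range(1, size):
--         high = k.bit_length() - 1
--         table.append(table[k - (1 << high)] + var_names[high])
--
--     terms = ["1" if k == 0 else table[k]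
--              for k in range(size) if anf_coeffs[k] == 1]
--     if not terms:
--         return "0"
--     return " ⊕ ".join(terms)
-- ===== Notes on version B (the rewrite author's own statement) =====
-- stated objective: alternative
-- what changed: Replaces the per-term inner scan over all n bit positions with a dynamic-programming table built once over all masks: each monomial string extends the already-computed monomial for the mask with its highest bit cleared.
-- outside the precondition, e.g. on anf_to_string([0, 0, 0, 0], 2, ['a']): A returns '0', B raises IndexError
import Mathlib
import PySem

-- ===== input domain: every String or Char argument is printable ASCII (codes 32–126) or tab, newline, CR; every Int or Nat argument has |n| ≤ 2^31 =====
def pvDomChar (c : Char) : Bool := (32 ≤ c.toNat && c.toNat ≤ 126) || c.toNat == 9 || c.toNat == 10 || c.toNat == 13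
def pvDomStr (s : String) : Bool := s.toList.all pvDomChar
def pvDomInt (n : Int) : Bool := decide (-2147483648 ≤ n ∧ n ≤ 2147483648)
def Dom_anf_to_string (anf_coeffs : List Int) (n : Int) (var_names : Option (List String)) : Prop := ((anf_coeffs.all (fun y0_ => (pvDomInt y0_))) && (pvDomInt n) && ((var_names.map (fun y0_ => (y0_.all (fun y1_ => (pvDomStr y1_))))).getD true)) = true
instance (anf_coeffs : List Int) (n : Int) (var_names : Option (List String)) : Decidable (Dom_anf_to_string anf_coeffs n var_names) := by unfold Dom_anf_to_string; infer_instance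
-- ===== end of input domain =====

-- B replaces A's per-term scan over all n bit positions by a dynamic-programming table of
-- monomial strings indexed by mask (each entry extends the entry for the mask with its highest
-- bit cleared); alternative algorithm of similar cost, proved to return the same string.


-- ===== PORT A =====
def anf_to_string (anf_coeffs : List Int) (n : Int) (var_names : Option (List String)) : String :=
  let vars := match var_names with
    | none => (List.range n.toNat).map (fun i => "x" ++ PySem.Int.toStr (Int.ofNat i))
    | some v => v
  let size := 1 <<< n.toNat
  let terms := (List.range size).foldl (fun terms k =>
    if anf_coeffs.getD k 0 = 1 then
      terms ++ [if k = 0 then "1"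
        else PySem.Str.join "" ((List.range n.toNat).foldl (fun factors i =>
          if (k >>> i) &&& 1 = 1 then factors ++ [vars.getD i ""] else factors) [])]
    else terms) []
  if terms = [] then "0" else PySem.Str.join " ⊕ " terms

-- ===== PORT B =====
-- the DP table: table = [""] ; for k in range(1, size): table.append(table[k - (1 << high)] + var_names[high])
def anfAltTable (vars : List String) : Nat → List String
  | 0 => [""]
  | k + 1 =>
    let t := anfAltTable vars k
    let high := Nat.log2 (k + 1)          -- (k+1).bit_length() - 1 for the positive mask k+1
    t ++ [t.getD ((k + 1) - (1 <<< high)) "" ++ vars.getD high ""]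

def anf_to_string_alt (anf_coeffs : List Int) (n : Int) (var_names : Option (List String)) : String :=
  let vars := match var_names with
    | none => (List.range n.toNat).map (fun i => "x" ++ PySem.Int.toStr (Int.ofNat i))
    | some v => v
  let size := 1 <<< n.toNat
  let table := anfAltTable vars (size - 1)
  let terms := (List.range size).filterMap (fun k =>
    if anf_coeffs.getD k 0 = 1 then some (if k = 0 then "1" else table.getD k "") else none)
  if terms = [] then "0" else PySem.Str.join " ⊕ " terms

-- ===== PRECONDITION & SPEC =====
-- Pre_ excludes exactly the inputs where the Python raises: n < 0 (negative shift), fewer than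
-- 2^n coefficients (IndexError), or a given var_names list with fewer than n names — there A
-- raises on most coefficient patterns and only accidentally returns when no high-indexed
-- variable is demanded, while B's table build always indexes all of them and raises.
def Pre_anf_to_string (anf_coeffs : List Int) (n : Int) (var_names : Option (List String)) : Prop :=
  0 ≤ n ∧ anf_coeffs ≠ [] ∧ n.toNat ≤ Nat.log2 anf_coeffs.length ∧
    (∀ v ∈ var_names, n.toNat ≤ v.length)
instance (anf_coeffs : List Int) (n : Int) (var_names : Option (List String)) : Decidable (Pre_anf_to_string anf_coeffs n var_names) := by unfold Pre_anf_to_string; infer_instance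
def pvWitness_anf_to_string : List Int × Int × Option (List String) := ([1, 1, 1, 0], 2, none)
def Spec_anf_to_string (anf_coeffs : List Int) (n : Int) (var_names : Option (List String)) (out : String) : Prop := out = anf_to_string_alt anf_coeffs n var_names
instance (anf_coeffs : List Int) (n : Int) (var_names : Option (List String)) (out : String) : Decidable (Spec_anf_to_string anf_coeffs n var_names out) := by unfold Spec_anf_to_string; infer_instance

-- ===== CLAIM (what is proved, stated in full; the proofs are below) =====
def Claim_equal_anf_to_string : Prop := ∀ (anf_coeffs : List Int) (n : Int) (var_names : Option (List String)), Dom_anf_to_string anf_coeffs n var_names → Pre_anf_to_string anf_coeffs n var_names → Spec_anf_to_string anf_coeffs n var_names (anf_to_string anf_coeffs n var_names)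

-- ===== LEMMAS AND PROOFS =====

-- the ascending list of set-bit positions of k (every set bit of a positive k is < k)
def pvBits (k : Nat) : List Nat := (List.range k).filter k.testBit

theorem pvTestBit_lt {k i : Nat} (h : k.testBit i = true) : i < k := by
  by_contra hc
  push Not at hc
  have h2 : k < 2 ^ i := lt_of_le_of_lt hc (Nat.lt_two_pow_self)
  rw [Nat.testBit_lt_two_pow h2] at h
  exact Bool.false_ne_true h

theorem pvFilter_range_ext {a b k : Nat} (hab : a ≤ b)
    (ha : ∀ i, k.testBit i = true → i < a) :
    (List.range b).filter k.testBit = (List.range a).filter k.testBit := by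
  have : b = a + (b - a) := by omega
  rw [this, List.range_add, List.filter_append]
  have : ((List.range (b - a)).map (a + ·)).filter k.testBit = [] := by
    rw [List.filter_eq_nil_iff]
    intro x hx
    simp only [List.mem_map, List.mem_range] at hx
    obtain ⟨y, _, rfl⟩ := hx
    intro ht
    exact absurd (ha _ ht) (by omega)
  rw [this, List.append_nil]

-- decomposition of the set-bit list at the highest bit
theorem pvBits_decomp {k : Nat} (hk : 0 < k) :
    pvBits k = pvBits (k - (1 <<< Nat.log2 k)) ++ [Nat.log2 k] := by
  set h := Nat.log2 k with hh
  have hpow : 2 ^ h ≤ k := Nat.log2_self_le (by omega)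
  have hlt : k < 2 ^ (h + 1) := Nat.lt_log2_self
  set r := k - (1 <<< h) with hr
  have hshift : (1 <<< h) = 2 ^ h := by simp [Nat.shiftLeft_eq]
  have hkr : k = 2 ^ h + r := by omega
  have hrlt : r < 2 ^ h := by omega
  -- set bits of k are < h+1 ; set bits of r are < r and < h
  have hbk : ∀ i, k.testBit i = true → i < h + 1 := by
    intro i hi
    by_contra hc
    push Not at hc
    have : k < 2 ^ i := lt_of_lt_of_le hlt (Nat.pow_le_pow_right (by norm_num) hc)
    rw [Nat.testBit_lt_two_pow this] at hi
    exact Bool.false_ne_true hi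
  have hbr : ∀ i, r.testBit i = true → i < h := by
    intro i hi
    by_contra hc
    push Not at hc
    have : r < 2 ^ i := lt_of_lt_of_le hrlt (Nat.pow_le_pow_right (by norm_num) hc)
    rw [Nat.testBit_lt_two_pow this] at hi
    exact Bool.false_ne_true hi
  have step1 : pvBits k = (List.range (h + 1)).filter k.testBit := by
    unfold pvBits
    rcases Nat.le_total (h + 1) k with hle | hle
    · exact pvFilter_range_ext hle hbk
    · exact (pvFilter_range_ext hle (fun i hi => pvTestBit_lt hi)).symm
  have hbit_h : k.testBit h = true := by
    rw [hkr, Nat.testBit_two_pow_add_eq, Nat.testBit_lt_two_pow hrlt]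
    rfl
  have step2 : (List.range (h + 1)).filter k.testBit
      = (List.range h).filter k.testBit ++ [h] := by
    rw [List.range_succ, List.filter_append]
    simp [hbit_h]
  have step3 : (List.range h).filter k.testBit = (List.range h).filter r.testBit := by
    apply List.filter_congr
    intro i hi
    rw [List.mem_range] at hi
    rw [hkr, Nat.testBit_two_pow_add_gt hi]
  have step4 : (List.range h).filter r.testBit = pvBits r := by
    unfold pvBits
    rcases Nat.le_total h r with hle | hle
    · exact (pvFilter_range_ext hle hbr).symm
    · exact pvFilter_range_ext hle (fun i hi => pvTestBit_lt hi)
  rw [step1, step2, step3, step4]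

-- the character-level contents of a monomial: factors of the set bits, concatenated
def pvMono (vars : List String) (k : Nat) : List Char :=
  ((pvBits k).map (fun i => (vars.getD i "").toList)).flatten

theorem pvJoin_empty_sep (ls : List (List Char)) : PySem.Chars.join [] ls = ls.flatten := by
  induction ls with
  | nil => simp [PySem.Chars.join_nil]
  | cons p t ih =>
    cases t with
    | nil => simp [PySem.Chars.join_singleton]
    | cons q t2 =>
      rw [PySem.Chars.join_cons_cons]
      simp only [List.flatten_cons] at ih ⊢
      rw [ih]
      simp

theorem pvOfList_eq {a b : String} (h : a.toList = b.toList) : a = b := by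
  have := congrArg String.ofList h
  simpa using this

theorem pvAltTable_length (vars : List String) (K : Nat) :
    (anfAltTable vars K).length = K + 1 := by
  induction K with
  | zero => rfl
  | succ k ih => simp [anfAltTable, ih]

theorem pvAltTable_getD (vars : List String) (K : Nat) :
    ∀ j ≤ K, ((anfAltTable vars K).getD j "").toList = pvMono vars j := by
  induction K with
  | zero =>
    intro j hj
    interval_cases j
    simp [anfAltTable, pvMono, pvBits, List.getD]
  | succ k ih =>
    intro j hj
    rcases Nat.lt_or_ge j (k + 1) with hlt | hge
    · -- old entry, unchanged by the append
      have hlen : j < (anfAltTable vars k).length := by rw [pvAltTable_length]; omega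
      have : (anfAltTable vars (k + 1)).getD j "" = (anfAltTable vars k).getD j "" := by
        simp only [anfAltTable, List.getD, List.getElem?_append_left hlen]
      rw [this]
      exact ih j (by omega)
    · -- the freshly appended entry j = k + 1
      have hj1 : j = k + 1 := by omega
      subst hj1
      have hlen : (anfAltTable vars k).length = k + 1 := pvAltTable_length vars k
      have hget : (anfAltTable vars (k + 1)).getD (k + 1) ""
          = (anfAltTable vars k).getD ((k + 1) - (1 <<< Nat.log2 (k + 1))) ""
            ++ vars.getD (Nat.log2 (k + 1)) "" := by
        simp only [anfAltTable, List.getD]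
        rw [List.getElem?_append_right (by omega)]
        simp [hlen]
      rw [hget]
      set h := Nat.log2 (k + 1) with hh
      set r := (k + 1) - (1 <<< h) with hr
      have hshift : (1 <<< h) = 2 ^ h := by simp [Nat.shiftLeft_eq]
      have hpow1 : 1 ≤ 2 ^ h := Nat.one_le_two_pow
      have hrle : r ≤ k := by omega
      rw [String.toList_append, ih r hrle]
      unfold pvMono
      rw [pvBits_decomp (by omega : 0 < k + 1)]
      simp [hh, hr]

-- A's inner factor loop, joined, has exactly the monomial contents (for masks below 2^m)
theorem pvInner_eq (vars : List String) (m k : Nat) (hk : k < 2 ^ m) :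
    (PySem.Str.join "" ((List.range m).foldl (fun factors i =>
        if (k >>> i) &&& 1 = 1 then factors ++ [vars.getD i ""] else factors) [])).toList
      = pvMono vars k := by
  rw [PySem.List.foldl_append_ite (fun i => (k >>> i) &&& 1 = 1)]
  have htb : (fun i => decide ((k >>> i) &&& 1 = 1)) = k.testBit := by
    funext i
    simp [Nat.testBit, Nat.and_comm]
  have hemp : ("" : String).toList = [] := rfl
  rw [List.nil_append, htb, PySem.Str.toList_join, hemp, pvJoin_empty_sep]
  have hbk : ∀ i, k.testBit i = true → i < m := by
    intro i hi
    by_contra hc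
    push Not at hc
    have : k < 2 ^ i := lt_of_lt_of_le hk (Nat.pow_le_pow_right (by norm_num) hc)
    rw [Nat.testBit_lt_two_pow this] at hi
    exact Bool.false_ne_true hi
  have hext : (List.range m).filter k.testBit = pvBits k := by
    unfold pvBits
    rcases Nat.le_total k m with hle | hle
    · exact pvFilter_range_ext hle (fun i hi => pvTestBit_lt hi)
    · exact (pvFilter_range_ext hle hbk).symm
  simp [pvMono, hext, List.map_map, Function.comp_def]

theorem pvFilterMap_if {α β : Type} (p : α → Prop) [DecidablePred p] (g : α → β) (l : List α) :
    l.filterMap (fun x => if p x then some (g x) else none)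
      = (l.filter (fun x => decide (p x))).map g := by
  induction l with
  | nil => rfl
  | cons x t ih =>
    by_cases hx : p x <;> simp [hx, ih]

-- ===== VERDICT (by name: the statement is the Claim_ definition above) =====
theorem anf_to_string_spec : Claim_equal_anf_to_string := by
  intro anf_coeffs n var_names _ _
  unfold Spec_anf_to_string
  simp only [anf_to_string, anf_to_string_alt]
  set vars := (match var_names with
    | none => (List.range n.toNat).map (fun i => "x" ++ PySem.Int.toStr (Int.ofNat i))
    | some v => v) with hvars
  set size := 1 <<< n.toNat with hsize
  have hsize_eq : size = 2 ^ n.toNat := by simp [hsize, Nat.shiftLeft_eq]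
  have hterms :
      (List.range size).foldl (fun terms k =>
        if anf_coeffs.getD k 0 = 1 then
          terms ++ [if k = 0 then "1"
            else PySem.Str.join "" ((List.range n.toNat).foldl (fun factors i =>
              if (k >>> i) &&& 1 = 1 then factors ++ [vars.getD i ""] else factors) [])]
        else terms) []
      = (List.range size).filterMap (fun k =>
          if anf_coeffs.getD k 0 = 1 then
            some (if k = 0 then "1" else (anfAltTable vars (size - 1)).getD k "") else none) := by
    rw [PySem.List.foldl_append_ite (fun k => anf_coeffs.getD k 0 = 1), List.nil_append]
    rw [pvFilterMap_if (fun k => anf_coeffs.getD k 0 = 1)]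
    apply List.map_congr_left
    intro k hk
    rw [List.mem_filter, List.mem_range] at hk
    obtain ⟨hkr, _⟩ := hk
    by_cases hk0 : k = 0
    · simp [hk0]
    · simp only [if_neg hk0]
      apply pvOfList_eq
      rw [pvInner_eq vars n.toNat k (by omega), pvAltTable_getD vars (size - 1) k (by
        have : 1 ≤ size := by rw [hsize_eq]; exact Nat.one_le_two_pow
        omega)]
  rw [hterms]
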